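-- pv_equiv track=rewrite | github.com/spiralgenetics/biograph | python/biograph/classifier/gt_classifier.py | ref_ranges
-- ===== SOURCE A (Python) =====
-- def ref_ranges(contigs, chunk_size, in_vcf_name):
--     """
--     Chunk reference into pieces
--     """
--     for ref_name, final_stop in contigs:
--         start = 0
--         stop = start + chunk_size
--         while stop < final_stop:
--             yield ref_name, start, stop, in_vcf_name
--             start = stop
--             stop += chunk_size
--         yield ref_name, start, final_stop, in_vcf_name
-- ===== SOURCE B (Python) =====
-- def ref_ranges(contigs, chunk_size, in_vcf_name):
--     """
--     Chunk reference into pieces: precompute the list of cut points, then pair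
--     each start with the following cut (last stop is final_stop).
--     """
--     for ref_name, final_stop in contigs:
--         starts = list(range(0, max(final_stop, 1), chunk_size))
--         stops = starts[1:] + [final_stop]
--         for start, stop in zip(starts, stops):
--             yield ref_name, start, stop, in_vcf_name
-- ===== Notes on version B (the rewrite author's own statement) =====
-- stated objective: alternative
-- what changed: Instead of A's running-boundary while loop with a special trailing yield, B first materialises the list of cut points with range(0, max(final_stop,1), chunk_size), then pairs each start with its successor (last stop = final_stop) via a slice and zip.
-- outside the precondition, e.g. on ref_ranges([('c', -5)], -3, 'v'): A returns [('c', 0, -5, 'v')], B returns []; on ref_ranges([('c', -5)], 0, 'v'): A returns [('c', 0, -5, 'v')], B raises ValueError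
import Mathlib
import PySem

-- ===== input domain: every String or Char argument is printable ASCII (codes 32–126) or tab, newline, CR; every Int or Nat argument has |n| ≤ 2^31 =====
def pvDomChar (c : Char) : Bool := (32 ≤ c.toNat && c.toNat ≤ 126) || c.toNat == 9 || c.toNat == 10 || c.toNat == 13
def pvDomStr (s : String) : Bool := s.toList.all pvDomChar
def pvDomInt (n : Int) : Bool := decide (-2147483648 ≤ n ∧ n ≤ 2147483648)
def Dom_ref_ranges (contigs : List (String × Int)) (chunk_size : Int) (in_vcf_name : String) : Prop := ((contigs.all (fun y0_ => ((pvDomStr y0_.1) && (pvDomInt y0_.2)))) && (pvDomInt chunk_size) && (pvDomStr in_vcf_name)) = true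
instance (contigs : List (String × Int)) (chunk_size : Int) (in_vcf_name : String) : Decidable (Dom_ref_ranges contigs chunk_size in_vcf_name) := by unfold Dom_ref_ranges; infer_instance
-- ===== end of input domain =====

-- B replaces A's running-boundary while loop (+ trailing yield) by materialising the
-- list of cut points with range(0, max(final_stop,1), chunk_size) and zipping each
-- start with its successor (last stop = final_stop); stated for positive chunk_size
-- (objective: alternative, same cost).


-- ===== PORT A =====
-- the inner 'while stop < final_stop' loop; fuel-bounded (under Pre_ the fuel
-- final_stop.natAbs + 1 exceeds the iteration count, so the 0-fuel arm is unreachable)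
def refRangesLoopA (ref vcf : String) (cs fs : Int) : Int → Int → Nat → List (String × Int × Int × String)
  | start, _, 0 => [(ref, start, fs, vcf)]
  | start, stop, fuel+1 =>
      if stop < fs then (ref, start, stop, vcf) :: refRangesLoopA ref vcf cs fs stop (stop + cs) fuel
      else [(ref, start, fs, vcf)]

def ref_ranges (contigs : List (String × Int)) (chunk_size : Int) (in_vcf_name : String) : List (String × Int × Int × String) :=
  contigs.flatMap (fun c => refRangesLoopA c.1 in_vcf_name chunk_size c.2 0 (0 + chunk_size) (c.2.natAbs + 1))

-- ===== PORT B =====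
-- starts = list(range(0, max(final_stop, 1), chunk_size)); stops = starts[1:] + [final_stop];
-- yield (name, start, stop, vcf) for (start, stop) in zip(starts, stops)
def refRangesChunksB (ref vcf : String) (cs fs : Int) : List (String × Int × Int × String) :=
  let starts := PySem.List.pyRange 0 (max fs 1) cs
  let stops := PySem.List.slice starts (some 1) none ++ [fs]
  (starts.zip stops).map (fun p => (ref, p.1, p.2, vcf))

def ref_ranges_alt (contigs : List (String × Int)) (chunk_size : Int) (in_vcf_name : String) : List (String × Int × Int × String) :=
  contigs.flatMap (fun c => refRangesChunksB c.1 in_vcf_name chunk_size c.2)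

-- ===== PRECONDITION & SPEC =====
-- Pre_ restricts to the natural domain of positive chunk sizes (empty contigs are
-- always fine): with nonempty contigs and chunk_size ≤ 0, A diverges whenever some
-- final_stop exceeds chunk_size, and in the remaining corner (final_stop ≤ chunk_size ≤ 0)
-- A's single range is an accident of the loop never running, while B's range() call
-- raises (chunk_size = 0) or is empty (negative step).
def Pre_ref_ranges (contigs : List (String × Int)) (chunk_size : Int) (in_vcf_name : String) : Prop :=
  0 < chunk_size ∨ contigs = []
instance (contigs : List (String × Int)) (chunk_size : Int) (in_vcf_name : String) : Decidable (Pre_ref_ranges contigs chunk_size in_vcf_name) := by unfold Pre_ref_ranges; infer_instance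

def pvWitness_ref_ranges : (List (String × Int)) × Int × String := ([("chr1", 25)], 10, "in.vcf")

def Spec_ref_ranges (contigs : List (String × Int)) (chunk_size : Int) (in_vcf_name : String) (out : List (String × Int × Int × String)) : Prop := out = ref_ranges_alt contigs chunk_size in_vcf_name
instance (contigs : List (String × Int)) (chunk_size : Int) (in_vcf_name : String) (out : List (String × Int × Int × String)) : Decidable (Spec_ref_ranges contigs chunk_size in_vcf_name out) := by unfold Spec_ref_ranges; infer_instance

-- ===== CLAIM (what is proved, stated in full; the proofs are below) =====
def Claim_equal_ref_ranges : Prop := ∀ (contigs : List (String × Int)) (chunk_size : Int) (in_vcf_name : String), Dom_ref_ranges contigs chunk_size in_vcf_name → Pre_ref_ranges contigs chunk_size in_vcf_name → Spec_ref_ranges contigs chunk_size in_vcf_name (ref_ranges contigs chunk_size in_vcf_name)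

-- ===== LEMMAS AND PROOFS =====

-- unfolding lemmas for pyRange with a general positive step
lemma pyRange_pos_nil (a b step : Int) (hs : 0 < step) (hba : b ≤ a) :
    PySem.List.pyRange a b step = [] := by
  rw [PySem.List.pyRange_of_pos _ _ hs, if_neg (not_lt.mpr hba)]
  simp

lemma pyRange_pos_cons (a b step : Int) (hs : 0 < step) (hab : a < b) :
    PySem.List.pyRange a b step = a :: PySem.List.pyRange (a + step) b step := by
  rw [PySem.List.pyRange_of_pos _ _ hs, PySem.List.pyRange_of_pos _ _ hs, if_pos hab]
  by_cases h : a + step < b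
  · rw [if_pos h]
    have hnum : b - a + step - 1 = (b - (a + step) + step - 1) + 1 * step := by ring
    have hq : (b - a + step - 1) / step = (b - (a + step) + step - 1) / step + 1 := by
      rw [hnum, Int.add_mul_ediv_right _ _ (by omega : step ≠ 0)]
    have hq0 : 0 ≤ (b - (a + step) + step - 1) / step :=
      Int.ediv_nonneg (by omega) (by omega)
    have ht : ((b - a + step - 1) / step).toNat
        = ((b - (a + step) + step - 1) / step).toNat + 1 := by omega
    rw [ht, List.range_succ_eq_map, List.map_cons, List.map_map]
    congr 1
    · simp
    · refine List.map_congr_left fun k _ => ?_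
      simp only [Function.comp_apply, Nat.succ_eq_add_one]
      push_cast
      ring
  · rw [if_neg h]
    have h1 : (1 : Int) ≤ (b - a + step - 1) / step :=
      (Int.le_ediv_iff_mul_le hs).mpr (by omega)
    have h2 : (b - a + step - 1) / step < 2 :=
      (Int.ediv_lt_iff_lt_mul hs).mpr (by omega)
    have ht : ((b - a + step - 1) / step).toNat = 1 := by omega
    rw [ht]
    simp

-- loop invariant: at a reached start s (0 ≤ s < max fs 1), A's remaining output is
-- B's zip of the cut points from s on
lemma refRangesLoopA_eq (ref vcf : String) (cs fs : Int) (hcs : 0 < cs) :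
    ∀ (fuel : Nat) (s : Int), 0 ≤ s → s < max fs 1 → max fs 1 - s ≤ (fuel : Int) →
      refRangesLoopA ref vcf cs fs s (s + cs) fuel =
        ((PySem.List.pyRange s (max fs 1) cs).zip
          ((PySem.List.pyRange s (max fs 1) cs).tail ++ [fs])).map
          (fun p => (ref, p.1, p.2, vcf)) := by
  intro fuel
  induction fuel with
  | zero => intro s _ hsM hf; exfalso; omega
  | succ fuel ih =>
    intro s hs0 hsM hf
    rw [pyRange_pos_cons s (max fs 1) cs hcs hsM, List.tail_cons]
    by_cases h : s + cs < fs
    · have hM : max fs 1 = fs := by omega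
      have hlt : s + cs < max fs 1 := by omega
      rw [refRangesLoopA, if_pos h,
        pyRange_pos_cons (s + cs) (max fs 1) cs hcs hlt]
      have hrec := ih (s + cs) (by omega) hlt (by omega)
      rw [pyRange_pos_cons (s + cs) (max fs 1) cs hcs hlt, List.tail_cons] at hrec
      simp only [List.cons_append, List.zip_cons_cons, List.map_cons]
      rw [hrec]
    · have hle : max fs 1 ≤ s + cs := by omega
      rw [refRangesLoopA, if_neg h, pyRange_pos_nil (s + cs) (max fs 1) cs hcs hle]
      simp

-- per-contig equality under 0 < cs
lemma refRangesContig_eq (ref vcf : String) (cs fs : Int) (hcs : 0 < cs) :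
    refRangesLoopA ref vcf cs fs 0 (0 + cs) (fs.natAbs + 1) = refRangesChunksB ref vcf cs fs := by
  have hfsle : fs ≤ (fs.natAbs : Int) := Int.le_natAbs
  have hmain := refRangesLoopA_eq ref vcf cs fs hcs (fs.natAbs + 1) 0 le_rfl
    (by omega) (by omega)
  rw [hmain]
  simp only [refRangesChunksB, PySem.List.slice_from_one]

-- ===== VERDICT (by name: the statement is the Claim_ definition above) =====
theorem ref_ranges_spec : Claim_equal_ref_ranges := by
  intro contigs chunk_size in_vcf_name _ hpre
  unfold Spec_ref_ranges ref_ranges ref_ranges_alt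
  rcases hpre with hpre | rfl
  swap
  · rfl
  rw [show (fun c : String × Int =>
        refRangesLoopA c.1 in_vcf_name chunk_size c.2 0 (0 + chunk_size) (c.2.natAbs + 1)) =
      (fun c : String × Int => refRangesChunksB c.1 in_vcf_name chunk_size c.2) from
    funext fun c => refRangesContig_eq c.1 in_vcf_name chunk_size c.2 hpre]
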